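-- pv_equiv track=rewrite | github.com/YoViajo/cartografia | 04/python/texture_shader/dct.py | fft_cost
-- ===== SOURCE A (Python) =====
-- def fft_cost(n):
--     # find factors of n and estimate time cost for FFTPACK
--
--     cost = 0
--
--     nl = n
--
--     while nl & 3 == 0:
--         nl >>= 2
--         cost += 5  # factor of 4
--
--     if nl & 1 == 0:
--         nl >>= 1
--         cost += 5  # factor of 2
--
--     if nl == 1:
--         return cost * n
--
--     for ntry in range(3, nl + 1, 2):
--
--         nq = nl // ntry
--         if nq < ntry:
--             cost += 3 + nl  # factor of nl
--             break
--         nr = nl - ntry * nq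
--
--         while nr == 0:
--             cost += 3 + ntry  # factor of ntry
--             if nq == 1:
--                 return cost * n
--             nl = nq
--             nq = nl // ntry
--             nr = nl - ntry * nq
--
--     return cost * n
-- ===== SOURCE B (Python) =====
-- def fft_cost(n):
--     # price the power of two arithmetically, then factor the odd part by dividing
--     # only by primes from a sieve of Eratosthenes up to isqrt(odd part)
--     nl = n
--     v = 0
--     while nl % 2 == 0:
--         nl //= 2
--         v += 1
--     cost = 5 * ((v + 1) // 2)
--     if nl >= 3:
--         r = 1
--         while (r + 1) * (r + 1) <= nl:
--             r += 1
--         sieve = [True] * (r + 1)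
--         p = 2
--         while p <= r:
--             if sieve[p]:
--                 for q in range(p * p, r + 1, p):
--                     sieve[q] = False
--             p += 1
--         for p in range(3, r + 1):
--             if sieve[p]:
--                 while nl % p == 0:
--                     nl //= p
--                     cost += 3 + p
--         if nl > 1:
--             cost += 3 + nl
--     return cost * n
-- ===== Notes on version B (the rewrite author's own statement) =====
-- stated objective: alternative
-- what changed: B counts the full power of two in one loop and prices it arithmetically (5*ceil(v/2)) instead of A's staged 4-then-2 bit-stripping, and factors the odd part by dividing only by primes taken from a sieve of Eratosthenes built up to isqrt(odd part), instead of A's trial division by every odd number with a dynamic cutoff inside the loop.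
import Mathlib
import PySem

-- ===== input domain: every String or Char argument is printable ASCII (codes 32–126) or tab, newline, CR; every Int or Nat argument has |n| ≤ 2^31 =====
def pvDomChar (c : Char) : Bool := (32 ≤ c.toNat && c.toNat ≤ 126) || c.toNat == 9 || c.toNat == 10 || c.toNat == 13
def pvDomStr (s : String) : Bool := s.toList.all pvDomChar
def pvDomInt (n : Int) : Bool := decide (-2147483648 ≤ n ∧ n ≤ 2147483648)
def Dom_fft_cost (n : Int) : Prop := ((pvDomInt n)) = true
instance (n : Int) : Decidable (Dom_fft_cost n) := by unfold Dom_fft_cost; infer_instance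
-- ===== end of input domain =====

-- B re-implements A's FFTPACK cost estimate differently: it counts the full power of two and
-- prices it arithmetically, then factors the odd part by dividing only by primes taken from a
-- sieve of Eratosthenes up to the integer square root (same exact result; similar cost).

-- ===== PORT A =====

-- 'while nl & 3 == 0: nl >>= 2; cost += 5'
def aStrip4 (nl cost : Int) : Int × Int :=
  if PySem.Int.band nl 3 = 0 then
    if h : (nl >>> (2 : Nat)).natAbs < nl.natAbs then aStrip4 (nl >>> (2 : Nat)) (cost + 5)
    else (nl, cost)
  else (nl, cost)
termination_by nl.natAbs
decreasing_by exact h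

mutual
def aFor : List Int → Int → Int → Int
  | [], _, cost => cost
  | ntry :: ts, nl, cost =>
    let nq := PySem.Int.floordiv nl ntry
    if nq < ntry then cost + 3 + nl
    else aWhile ntry ts nl nq cost
termination_by ts nl cost => (ts.length, 0, 0)
def aWhile (ntry : Int) (ts : List Int) (nl nq cost : Int) : Int :=
  if nl - ntry * nq = 0 then
    if nq = 1 then cost + 3 + ntry
    else
      if h : nq.natAbs < nl.natAbs then
        aWhile ntry ts nq (PySem.Int.floordiv nq ntry) (cost + 3 + ntry)
      else cost
  else aFor ts nl cost
termination_by (ts.length, 1, nl.natAbs)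
end

-- every exit of A's 'for ntry in range(3, nl+1, 2)' loop returns cost * n, so aFor/aWhile
-- return the final cost and fft_cost multiplies by n once
def fft_cost (n : Int) : Int :=
  let p := aStrip4 n 0
  let p2 := if PySem.Int.band p.1 1 = 0 then (p.1 >>> (1 : Nat), p.2 + 5) else p
  if p2.1 = 1 then p2.2 * n
  else aFor (PySem.List.pyRange 3 (p2.1 + 1) 2) p2.1 p2.2 * n

-- ===== PORT B =====

-- 'while nl % 2 == 0: nl //= 2; v += 1'
def bV2 (nl v : Int) : Int × Int :=
  if PySem.Int.mod nl 2 = 0 then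
    if h : (PySem.Int.floordiv nl 2).natAbs < nl.natAbs then
      bV2 (PySem.Int.floordiv nl 2) (v + 1)
    else (nl, v)
  else (nl, v)
termination_by nl.natAbs
decreasing_by exact h

-- termination measure fact for bIsqrt (named so the proof term is shared, not inlined)
lemma bIsqrtDec (r nl : Int) (h : (r + 1) * (r + 1) ≤ nl) :
    (nl - (r + 1)).toNat < (nl - r).toNat := by
  have h0 : (0:Int) ≤ (r + 1) * (r + 1) := mul_self_nonneg _
  have hr : r < nl := by
    by_cases h1 : 0 ≤ r
    · nlinarith
    · omega
  omega

-- 'r = 1; while (r + 1) * (r + 1) <= nl: r += 1'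
def bIsqrt (r nl : Int) : Int :=
  if h : (r + 1) * (r + 1) ≤ nl then bIsqrt (r + 1) nl else r
termination_by (nl - r).toNat
decreasing_by exact bIsqrtDec r nl h

-- 'for q in range(p * p, r + 1, p): sieve[q] = False'  (every q lies in [0, len(sieve)))
def bMark (sieve : List Bool) (qs : List Int) : List Bool :=
  qs.foldl (fun s q => PySem.List.pySetD s q false) sieve

-- 'p = 2; while p <= r: if sieve[p]: …mark…; p += 1'  (p is always in range when read)
-- termination measure fact for bSieveOuter (named so the proof term is shared, not inlined)
lemma bSieveDec (p r : Int) (hp : p ≤ r) : (r + 1 - (p + 1)).toNat < (r + 1 - p).toNat := by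
  omega

def bSieveOuter (p r : Int) (sieve : List Bool) : List Bool :=
  if hp : p ≤ r then
    bSieveOuter (p + 1) r
      (if PySem.List.pyGetD sieve p false = true then
        bMark sieve (PySem.List.pyRange (p * p) (r + 1) p)
      else sieve)
  else sieve
termination_by (r + 1 - p).toNat
decreasing_by exact bSieveDec p r hp

-- 'while nl % p == 0: nl //= p; cost += 3 + p'
def bDivOne (p nl cost : Int) : Int × Int :=
  if PySem.Int.mod nl p = 0 then
    if h : (PySem.Int.floordiv nl p).natAbs < nl.natAbs then
      bDivOne p (PySem.Int.floordiv nl p) (cost + (3 + p))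
    else (nl, cost)
  else (nl, cost)
termination_by nl.natAbs
decreasing_by exact h

-- 'for p in range(3, r + 1): if sieve[p]: …divide…'
def bDivLoop : List Int → List Bool → Int → Int → Int × Int
  | [], _, nl, cost => (nl, cost)
  | p :: ps, sieve, nl, cost =>
    if PySem.List.pyGetD sieve p false = true then
      let q := bDivOne p nl cost
      bDivLoop ps sieve q.1 q.2
    else bDivLoop ps sieve nl cost

def fft_cost_alt (n : Int) : Int :=
  let w := bV2 n 0
  let cost := 5 * PySem.Int.floordiv (w.2 + 1) 2
  if 3 ≤ w.1 then
    let r := bIsqrt 1 w.1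
    let sieve := bSieveOuter 2 r (PySem.List.pyRepeat [true] (r + 1))
    let q := bDivLoop (PySem.List.pyRange 3 (r + 1) 1) sieve w.1 cost
    (if 1 < q.1 then q.2 + (3 + q.1) else q.2) * n
  else cost * n

-- ===== PRECONDITION & SPEC =====
-- Pre_ excludes only n = 0, on which the Python A (and B) loops forever (never returns).
def Pre_fft_cost (n : Int) : Prop := n ≠ 0
instance (n : Int) : Decidable (Pre_fft_cost n) := by unfold Pre_fft_cost; infer_instance
def pvWitness_fft_cost : Int := 12

def Spec_fft_cost (n : Int) (out : Int) : Prop := out = fft_cost_alt n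
instance (n : Int) (out : Int) : Decidable (Spec_fft_cost n out) := by unfold Spec_fft_cost; infer_instance

-- ===== CLAIM (what is proved, stated in full; the proofs are below) =====
def Claim_equal_fft_cost : Prop := ∀ (n : Int), Dom_fft_cost n → Pre_fft_cost n → Spec_fft_cost n (fft_cost n)

-- ===== LEMMAS AND PROOFS =====

-- ---------- proof-side helpers: a reference odd trial division collecting a factor list ----------

def bInner (ntry nl : Int) (fs : List Int) : Int × List Int :=
  if PySem.Int.mod nl ntry = 0 then
    if h : (PySem.Int.floordiv nl ntry).natAbs < nl.natAbs then
      bInner ntry (PySem.Int.floordiv nl ntry) (fs ++ [ntry])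
    else (nl, fs)
  else (nl, fs)
termination_by nl.natAbs
decreasing_by exact h

def bOuter (ntry nl : Int) (fs : List Int) : Int × List Int :=
  if ntry * ntry ≤ nl then
    let p := bInner ntry nl fs
    if h : (p.1 - (ntry + 2)).toNat < (nl - ntry).toNat then
      bOuter (ntry + 2) p.1 p.2
    else p
  else (nl, fs)
termination_by (nl - ntry).toNat
decreasing_by exact h

def bCost (fs : List Int) : Int :=
  (fs.map (fun f => if f = 2 ∨ f = 4 then (5 : Int) else 3 + f)).sum

def priceOdd (fs : List Int) : Int := (fs.map (fun f => 3 + f)).sum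

-- 'no divisor in [2, p)' — for p ≥ 2 this is primality
def IsP (p : Int) : Prop := 2 ≤ p ∧ ∀ d : Int, 2 ≤ d → d < p → ¬ d ∣ p

-- ---------- generic arithmetic lemmas ----------

lemma band_three (a : Int) : PySem.Int.band a 3 = PySem.Int.mod a 4 := by
  rw [PySem.Int.mod_eq_emod_of_pos (by norm_num)]
  cases a with
  | ofNat m =>
    simp [PySem.Int.band]
    rw [Nat.and_two_pow_sub_one_eq_mod m 2]
    omega
  | negSucc m =>
    simp [PySem.Int.band]
    rw [Nat.and_comm, Nat.and_two_pow_sub_one_eq_mod m 2]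
    rw [Int.negSucc_eq]
    omega

lemma shiftr_two (a : Int) : a >>> (2 : Nat) = PySem.Int.floordiv a 4 := by
  rw [Int.shiftRight_eq_div_pow, PySem.Int.floordiv_eq_ediv_of_pos (by norm_num)]
  norm_num

lemma shiftr_one (a : Int) : a >>> (1 : Nat) = PySem.Int.floordiv a 2 := by
  rw [Int.shiftRight_eq_div_pow, PySem.Int.floordiv_eq_ediv_of_pos (by norm_num)]
  norm_num

lemma fdiv_pos_eq (nl t k : Int) (ht : 0 < t) (hk : nl = t * k) :
    PySem.Int.floordiv nl t = k := by
  rw [PySem.Int.floordiv_eq_ediv_of_pos ht, hk, Int.mul_ediv_cancel_left _ (by omega)]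

lemma sub_mul_fdiv (nl t : Int) (ht : 0 < t) : nl - t * PySem.Int.floordiv nl t = PySem.Int.mod nl t := by
  have := PySem.Int.floordiv_mul_add_mod nl t
  linarith [this]

lemma mod_one_of (t : Int) (ht : 3 ≤ t) : PySem.Int.mod 1 t = 1 := by
  rw [PySem.Int.mod_eq_emod_of_pos (by omega)]
  exact Int.emod_eq_of_lt (by norm_num) (by omega)

lemma odd_not_dvd_even (n d : Int) (ho : Odd n) (hd : Even d) : ¬ d ∣ n := by
  rintro ⟨c, hc⟩
  obtain ⟨s, hs⟩ := hd
  obtain ⟨w, hw⟩ := ho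
  have : n = 2 * (s * c) := by rw [hc, hs]; ring
  omega

lemma oddAddTwo (t : Int) (h : Odd t) : Odd (t + 2) := by
  obtain ⟨w, hw⟩ := h; exact ⟨w + 1, by omega⟩

lemma odd_of_not_two_dvd (n : Int) (h : ¬ (2:Int) ∣ n) : Odd n := by
  rw [Int.odd_iff]; rw [Int.dvd_iff_emod_eq_zero] at h; omega

lemma odd_of_dvd_odd (d n : Int) (hd : d ∣ n) (hn : Odd n) : Odd d := by
  apply odd_of_not_two_dvd
  intro h2
  exact odd_not_dvd_even n 2 hn (by decide) (dvd_trans h2 hd)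

lemma isP_prime (p : Int) (h : IsP p) : p.toNat.Prime := by
  have h2le := h.1
  rw [Nat.prime_def_lt]
  refine ⟨by omega, ?_⟩
  intro m hm hdvd
  by_contra hm1
  have hm0 : m ≠ 0 := by
    rintro rfl
    have : p.toNat = 0 := Nat.eq_zero_of_zero_dvd hdvd
    omega
  have hdz : (m : Int) ∣ p := by
    have : (m : Int) ∣ (p.toNat : Int) := Int.natCast_dvd_natCast.mpr hdvd
    rwa [Int.toNat_of_nonneg (by omega : (0:Int) ≤ p)] at this
  exact h.2 m (by omega) (by omega) hdz

lemma isP_ne_four (p : Int) (h : IsP p) : p ≠ 4 := by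
  rintro rfl
  exact h.2 2 (by norm_num) (by norm_num) ⟨2, by norm_num⟩

lemma exists_small_divisor (r : Int) (h1 : 1 < r) (h2 : ¬ IsP r) :
    ∃ a : Int, 2 ≤ a ∧ a * a ≤ r ∧ a ∣ r := by
  unfold IsP at h2
  push_neg at h2
  obtain ⟨d, hd2, hdr, hdd⟩ := h2 (by omega)
  obtain ⟨e, he⟩ := hdd
  have he2 : 2 ≤ e := by nlinarith
  rcases le_total d e with h | h
  · exact ⟨d, hd2, by nlinarith, ⟨e, he⟩⟩
  · exact ⟨e, he2, by nlinarith, ⟨d, by rw [he]; ring⟩⟩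

lemma isP_of_no_small (r : Int) (h1 : 1 < r)
    (h : ∀ a : Int, 2 ≤ a → a * a ≤ r → ¬ a ∣ r) : IsP r := by
  by_contra hc
  obtain ⟨a, ha2, haa, had⟩ := exists_small_divisor r h1 hc
  exact h a ha2 haa had

lemma prime_divisor_small (r : Int) (h1 : 1 < r) (h2 : ¬ IsP r) :
    ∃ q : Nat, q.Prime ∧ (q : Int) ∣ r ∧ (q : Int) * (q : Int) ≤ r := by
  obtain ⟨a, ha2, haa, had⟩ := exists_small_divisor r h1 h2
  refine ⟨a.toNat.minFac, Nat.minFac_prime (by omega), ?_, ?_⟩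
  · have h1 : (a.toNat.minFac : Int) ∣ (a.toNat : Int) := Int.natCast_dvd_natCast.mpr (Nat.minFac_dvd _)
    rw [Int.toNat_of_nonneg (by omega : (0:Int) ≤ a)] at h1
    exact dvd_trans h1 had
  · have hle : a.toNat.minFac ≤ a.toNat := Nat.minFac_le (by omega)
    have : (a.toNat.minFac : Int) ≤ a := by omega
    nlinarith [Nat.minFac_prime (show a.toNat ≠ 1 by omega) |>.two_le]

lemma priceOdd_append (fs gs : List Int) : priceOdd (fs ++ gs) = priceOdd fs + priceOdd gs := by
  simp [priceOdd]

lemma bCost_eq_priceOdd (fs : List Int) (h : ∀ f ∈ fs, f ≠ 2 ∧ f ≠ 4) :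
    bCost fs = priceOdd fs := by
  unfold bCost priceOdd
  congr 1
  apply List.map_congr_left
  intro f hf
  have := h f hf
  simp [this.1, this.2]

lemma prod_toNat_cast (L : List Int) (h : ∀ f ∈ L, 0 ≤ f) :
    ((L.map Int.toNat).prod : Int) = L.prod := by
  induction L with
  | nil => simp
  | cons x xs ih =>
    simp only [List.map_cons, List.prod_cons, Nat.cast_mul]
    rw [ih (fun f hf => h f (by simp [hf])), Int.toNat_of_nonneg (h x (by simp))]

lemma priceOdd_cast (L : List Int) (h : ∀ f ∈ L, 0 ≤ f) :
    priceOdd L = ((((L.map Int.toNat).map (fun k : Nat => 3 + k)).sum : Nat) : Int) := by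
  induction L with
  | nil => simp [priceOdd]
  | cons x xs ih =>
    have hx := h x (by simp)
    have hrest := ih (fun f hf => h f (by simp [hf]))
    simp only [priceOdd, List.map_cons, List.sum_cons, Nat.cast_add] at *
    rw [hrest]
    omega

lemma priceOdd_eq_of_prime_prod (L1 L2 : List Int) (m : Int) (hm : 0 < m)
    (h1 : ∀ f ∈ L1, f.toNat.Prime) (h2 : ∀ f ∈ L2, f.toNat.Prime)
    (e1 : L1.prod = m) (e2 : L2.prod = m) : priceOdd L1 = priceOdd L2 := by
  have n1 : ∀ f ∈ L1, (0:Int) ≤ f := fun f hf => by have := (h1 f hf).two_le; omega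
  have n2 : ∀ f ∈ L2, (0:Int) ≤ f := fun f hf => by have := (h2 f hf).two_le; omega
  have p1 : (L1.map Int.toNat).prod = m.toNat := by
    have := prod_toNat_cast L1 n1
    omega
  have p2 : (L2.map Int.toNat).prod = m.toNat := by
    have := prod_toNat_cast L2 n2
    omega
  have q1 : (L1.map Int.toNat).Perm m.toNat.primeFactorsList :=
    Nat.primeFactorsList_unique p1 (by intro p hp; obtain ⟨f, hf, rfl⟩ := List.mem_map.mp hp; exact h1 f hf)
  have q2 : (L2.map Int.toNat).Perm m.toNat.primeFactorsList :=
    Nat.primeFactorsList_unique p2 (by intro p hp; obtain ⟨f, hf, rfl⟩ := List.mem_map.mp hp; exact h2 f hf)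
  have hsum := ((q1.trans q2.symm).map (fun k : Nat => 3 + k)).sum_eq
  rw [priceOdd_cast L1 n1, priceOdd_cast L2 n2, hsum]

-- ---------- A-side: the strip-4/strip-2 phase against B's v2 count ----------

lemma bV2_acc : ∀ m : Nat, ∀ nl : Int, nl.natAbs = m → ∀ v,
    bV2 nl v = ((bV2 nl 0).1, v + (bV2 nl 0).2) := by
  intro m
  induction m using Nat.strong_induction_on with
  | _ m ih =>
    intro nl hm v
    by_cases hdvd : PySem.Int.mod nl 2 = 0
    · by_cases hg : (PySem.Int.floordiv nl 2).natAbs < nl.natAbs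
      · have step : ∀ w, bV2 nl w = bV2 (PySem.Int.floordiv nl 2) (w + 1) := by
          intro w; rw [bV2]; simp only [hdvd, if_true, dif_pos hg, ite_true]
        rw [step v, step 0,
            ih (PySem.Int.floordiv nl 2).natAbs (by omega) _ rfl (v + 1),
            ih (PySem.Int.floordiv nl 2).natAbs (by omega) _ rfl (0 + 1)]
        simp; ring
      · have step : ∀ w, bV2 nl w = (nl, w) := by
          intro w; rw [bV2]; simp only [hdvd, if_true, dif_neg hg, ite_true]
        rw [step v, step 0]; simp
    · have step : ∀ w, bV2 nl w = (nl, w) := by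
        intro w; rw [bV2]; simp only [hdvd, if_false, ite_false]
      rw [step v, step 0]; simp

lemma phase_rel : ∀ m : Nat, ∀ n : Int, n.natAbs = m → n ≠ 0 →
    Odd (bV2 n 0).1 ∧ 0 ≤ (bV2 n 0).2 ∧
    (∀ c, (if PySem.Int.band (aStrip4 n c).1 1 = 0
            then ((aStrip4 n c).1 >>> (1 : Nat), (aStrip4 n c).2 + 5)
            else aStrip4 n c)
        = ((bV2 n 0).1, c + 5 * PySem.Int.floordiv ((bV2 n 0).2 + 1) 2)) := by
  intro m
  induction m using Nat.strong_induction_on with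
  | _ m ih =>
    intro n hm hn
    by_cases h4 : PySem.Int.mod n 4 = 0
    · -- n = 4k
      obtain ⟨k, hk⟩ := (PySem.Int.mod_eq_zero_iff_dvd n 4).mp h4
      have hk0 : k ≠ 0 := by rintro rfl; simp at hk; exact hn hk
      have h2 : PySem.Int.mod n 2 = 0 := (PySem.Int.mod_eq_zero_iff_dvd n 2).mpr ⟨2 * k, by omega⟩
      have hf2 : PySem.Int.floordiv n 2 = 2 * k := fdiv_pos_eq n 2 (2 * k) (by norm_num) (by omega)
      have hf4 : PySem.Int.floordiv n 4 = k := fdiv_pos_eq n 4 k (by norm_num) hk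
      have hf22 : PySem.Int.floordiv (2 * k) 2 = k := fdiv_pos_eq _ 2 k (by norm_num) rfl
      have h2k : PySem.Int.mod (2 * k) 2 = 0 := (PySem.Int.mod_eq_zero_iff_dvd _ 2).mpr ⟨k, rfl⟩
      have hd1 : (2 * k).natAbs < n.natAbs := by
        have : n.natAbs = 4 * k.natAbs := by rw [hk, Int.natAbs_mul]; rfl
        omega
      have hd2 : k.natAbs < (2 * k).natAbs := by
        have : (2 * k).natAbs = 2 * k.natAbs := by rw [Int.natAbs_mul]; rfl
        omega
      have hd4 : k.natAbs < n.natAbs := by omega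
      have eb1 : bV2 n 0 = bV2 (2 * k) 1 := by
        conv_lhs => rw [bV2]
        rw [if_pos h2, hf2, dif_pos hd1, zero_add]
      have eb2 : bV2 (2 * k) 1 = bV2 k 2 := by
        conv_lhs => rw [bV2]
        rw [if_pos h2k, hf22, dif_pos hd2]
        norm_num
      have ebacc : bV2 n 0 = ((bV2 k 0).1, 2 + (bV2 k 0).2) := by
        rw [eb1, eb2, bV2_acc k.natAbs k rfl 2]
      obtain ⟨ho, hv, hrec⟩ := ih k.natAbs (by omega) k rfl hk0
      refine ⟨by rw [ebacc]; exact ho, by rw [ebacc]; simp; omega, ?_⟩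
      intro c
      have ea : aStrip4 n c = aStrip4 k (c + 5) := by
        conv_lhs => rw [aStrip4]
        rw [band_three, shiftr_two, hf4, if_pos h4, dif_pos hd4]
      rw [ea, hrec (c + 5), ebacc]
      refine Prod.ext rfl ?_
      simp only
      rw [PySem.Int.floordiv_eq_ediv_of_pos (by norm_num : (0:Int) < 2),
          PySem.Int.floordiv_eq_ediv_of_pos (by norm_num : (0:Int) < 2)]
      omega
    · by_cases h2 : PySem.Int.mod n 2 = 0
      · -- n = 2k, k odd
        obtain ⟨k, hk⟩ := (PySem.Int.mod_eq_zero_iff_dvd n 2).mp h2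
        have hk0 : k ≠ 0 := by rintro rfl; simp at hk; exact hn hk
        have hkodd : Odd k := by
          apply odd_of_not_two_dvd
          rintro ⟨j, hj⟩
          exact h4 ((PySem.Int.mod_eq_zero_iff_dvd n 4).mpr ⟨j, by omega⟩)
        have hf2 : PySem.Int.floordiv n 2 = k := fdiv_pos_eq n 2 k (by norm_num) hk
        have hd1 : k.natAbs < n.natAbs := by
          have : n.natAbs = 2 * k.natAbs := by rw [hk, Int.natAbs_mul]; rfl
          omega
        have hmk : ¬ PySem.Int.mod k 2 = 0 := by
          intro hc
          obtain ⟨j, hj⟩ := (PySem.Int.mod_eq_zero_iff_dvd k 2).mp hc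
          exact odd_not_dvd_even k 2 hkodd (by decide) ⟨j, hj⟩
        have eb1 : bV2 n 0 = bV2 k 1 := by
          conv_lhs => rw [bV2]
          rw [if_pos h2, hf2, dif_pos hd1, zero_add]
        have eb2 : bV2 k 1 = (k, 1) := by
          rw [bV2, if_neg hmk]
        have eb : bV2 n 0 = (k, 1) := eb1.trans eb2
        refine ⟨by rw [eb]; exact hkodd, by rw [eb]; norm_num, ?_⟩
        intro c
        have ea : aStrip4 n c = (n, c) := by
          conv_lhs => rw [aStrip4]
          rw [band_three, if_neg h4]
        rw [ea, eb]
        show (if PySem.Int.band n 1 = 0 then (n >>> (1 : Nat), c + 5) else (n, c))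
            = (k, c + 5 * PySem.Int.floordiv (1 + 1) 2)
        have hfd2 : PySem.Int.floordiv (1 + 1) 2 = 1 := fdiv_pos_eq _ 2 1 (by norm_num) (by norm_num)
        rw [PySem.Int.band_one, if_pos h2, shiftr_one, hf2, hfd2]
        norm_num
      · -- n odd
        have hodd : Odd n := by
          apply odd_of_not_two_dvd
          intro hd
          exact h2 ((PySem.Int.mod_eq_zero_iff_dvd n 2).mpr hd)
        have eb : bV2 n 0 = (n, 0) := by
          rw [bV2, if_neg h2]
        refine ⟨by rw [eb]; exact hodd, by rw [eb], ?_⟩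
        intro c
        have ea : aStrip4 n c = (n, c) := by
          conv_lhs => rw [aStrip4]
          rw [band_three, if_neg h4]
        rw [ea, eb]
        show (if PySem.Int.band n 1 = 0 then (n >>> (1 : Nat), c + 5) else (n, c))
            = (n, c + 5 * PySem.Int.floordiv (0 + 1) 2)
        have hfd1 : PySem.Int.floordiv (0 + 1) 2 = 0 := by
          rw [PySem.Int.floordiv_eq_ediv_of_pos (by norm_num : (0:Int) < 2)]
          decide
        rw [PySem.Int.band_one, if_neg h2, hfd1]
        norm_num

-- ---------- A-side: the odd trial-division loop (aFor/aWhile) against the reference collector ----------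

lemma bCost_append (fs gs : List Int) : bCost (fs ++ gs) = bCost fs + bCost gs := by
  simp [bCost]

lemma bCost_single_odd (t : Int) (h2 : t ≠ 2) (h4 : t ≠ 4) : bCost [t] = 3 + t := by
  simp [bCost, h2, h4]

lemma bInner_acc (t : Int) : ∀ m : Nat, ∀ nl : Int, nl.natAbs = m → ∀ fs,
    bInner t nl fs = ((bInner t nl []).1, fs ++ (bInner t nl []).2) := by
  intro m
  induction m using Nat.strong_induction_on with
  | _ m ih =>
    intro nl hm fs
    by_cases hdvd : PySem.Int.mod nl t = 0
    · by_cases hg : (PySem.Int.floordiv nl t).natAbs < nl.natAbs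
      · have step : ∀ gs, bInner t nl gs = bInner t (PySem.Int.floordiv nl t) (gs ++ [t]) := by
          intro gs; rw [bInner]; simp only [hdvd, if_true, dif_pos hg, ite_true]
        rw [step fs, step [],
            ih (PySem.Int.floordiv nl t).natAbs (by omega) _ rfl (fs ++ [t]),
            ih (PySem.Int.floordiv nl t).natAbs (by omega) _ rfl ([] ++ [t])]
        simp
      · have step : ∀ gs, bInner t nl gs = (nl, gs) := by
          intro gs; rw [bInner]; simp only [hdvd, if_true, dif_neg hg, ite_true]
        rw [step fs, step []]
        simp
    · have step : ∀ gs, bInner t nl gs = (nl, gs) := by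
        intro gs; rw [bInner]; simp only [hdvd, if_false, ite_false]
      rw [step fs, step []]
      simp

lemma bInner_facts (t : Int) (ht : 3 ≤ t) : ∀ m : Nat, ∀ nl : Int, nl.natAbs = m → 0 < nl →
    0 < (bInner t nl []).1 ∧ (bInner t nl []).1 ∣ nl ∧ ¬ t ∣ (bInner t nl []).1 ∧
    (t ∣ nl → t * (bInner t nl []).1 ≤ nl) := by
  intro m
  induction m using Nat.strong_induction_on with
  | _ m ih =>
    intro nl hm hpos
    by_cases hdvd : PySem.Int.mod nl t = 0
    · obtain ⟨k, hk⟩ := (PySem.Int.mod_eq_zero_iff_dvd nl t).mp hdvd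
      have hfd : PySem.Int.floordiv nl t = k := fdiv_pos_eq nl t k (by omega) hk
      have hkpos : 0 < k := by nlinarith
      have hklt : k < nl := by nlinarith
      have habs : k.natAbs < nl.natAbs := by omega
      have step : bInner t nl [] = bInner t k [t] := by
        rw [bInner, hfd]
        simp only [hdvd, if_true, dif_pos (by omega : k.natAbs < nl.natAbs), ite_true,
          List.nil_append]
      rw [step, bInner_acc t k.natAbs k rfl [t]]
      have := ih k.natAbs (by omega) k rfl hkpos
      refine ⟨this.1, dvd_trans this.2.1 ⟨t, by linarith [hk]⟩, this.2.2.1, fun _ => ?_⟩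
      by_cases htk : t ∣ k
      · have := this.2.2.2 htk
        nlinarith
      · have hkk : (bInner t k []).1 = k := by
          have : ¬ PySem.Int.mod k t = 0 := fun h => htk ((PySem.Int.mod_eq_zero_iff_dvd k t).mp h)
          rw [bInner]
          simp only [this, if_false, ite_false]
        rw [hkk]
        omega
    · have hnd : ¬ t ∣ nl := fun hd => hdvd ((PySem.Int.mod_eq_zero_iff_dvd nl t).mpr hd)
      have step : bInner t nl [] = (nl, []) := by
        rw [bInner]; simp only [hdvd, if_false, ite_false]
      rw [step]
      exact ⟨hpos, dvd_refl nl, hnd, fun h => absurd h hnd⟩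

lemma bInner_prod (t : Int) (ht : 2 ≤ t) : ∀ m : Nat, ∀ nl : Int, nl.natAbs = m → 0 < nl →
    (bInner t nl []).1 * ((bInner t nl []).2).prod = nl ∧
    (∀ f ∈ (bInner t nl []).2, f = t) ∧
    ((bInner t nl []).2 ≠ [] → t ∣ nl) := by
  intro m
  induction m using Nat.strong_induction_on with
  | _ m ih =>
    intro nl hm hpos
    by_cases hdvd : PySem.Int.mod nl t = 0
    · obtain ⟨k, hk⟩ := (PySem.Int.mod_eq_zero_iff_dvd nl t).mp hdvd
      have hfd : PySem.Int.floordiv nl t = k := fdiv_pos_eq nl t k (by omega) hk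
      have hkpos : 0 < k := by nlinarith
      have hklt : k < nl := by nlinarith
      have habs : k.natAbs < nl.natAbs := by omega
      have step : bInner t nl [] = ((bInner t k []).1, t :: (bInner t k []).2) := by
        rw [bInner, hfd]
        simp only [hdvd, if_true, dif_pos habs, ite_true, List.nil_append]
        rw [bInner_acc t k.natAbs k rfl [t]]
        rfl
      obtain ⟨e1, e2, _⟩ := ih k.natAbs (by omega) k rfl hkpos
      rw [step]
      refine ⟨?_, ?_, fun _ => (PySem.Int.mod_eq_zero_iff_dvd nl t).mp hdvd⟩
      · simp only [List.prod_cons]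
        rw [hk]
        nlinarith [e1]
      · intro f hf
        rcases List.mem_cons.mp hf with h | h
        · exact h
        · exact e2 f h
    · have step : bInner t nl [] = (nl, []) := by
        rw [bInner]; simp only [hdvd, if_false, ite_false]
      rw [step]
      exact ⟨by simp, by simp, by simp⟩

lemma bOuter_acc : ∀ μ : Nat, ∀ t nl : Int, (nl - t).toNat = μ → ∀ fs,
    bOuter t nl fs = ((bOuter t nl []).1, fs ++ (bOuter t nl []).2) := by
  intro μ
  induction μ using Nat.strong_induction_on with
  | _ μ ih =>
    intro t nl hμ fs
    by_cases hc : t * t ≤ nl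
    · by_cases hg : ((bInner t nl []).1 - (t + 2)).toNat < (nl - t).toNat
      · have step : ∀ gs, bOuter t nl gs = bOuter (t + 2) (bInner t nl []).1 (gs ++ (bInner t nl []).2) := by
          intro gs
          rw [bOuter]
          rw [bInner_acc t nl.natAbs nl rfl gs]
          simp only [hc, if_true, ite_true]
          rw [dif_pos (by simpa using hg)]
        rw [step fs, step [],
            ih ((bInner t nl []).1 - (t + 2)).toNat (by omega) (t + 2) (bInner t nl []).1 rfl (fs ++ (bInner t nl []).2),
            ih ((bInner t nl []).1 - (t + 2)).toNat (by omega) (t + 2) (bInner t nl []).1 rfl ([] ++ (bInner t nl []).2)]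
        simp
      · have step : ∀ gs, bOuter t nl gs = ((bInner t nl []).1, gs ++ (bInner t nl []).2) := by
          intro gs
          rw [bOuter]
          rw [bInner_acc t nl.natAbs nl rfl gs]
          simp only [hc, if_true, ite_true]
          rw [dif_neg (by simpa using hg)]
        rw [step fs, step []]
        simp
    · have step : ∀ gs, bOuter t nl gs = (nl, gs) := by
        intro gs; rw [bOuter]; simp only [hc, if_false, ite_false]
      rw [step fs, step []]
      simp

lemma bOuter_main : ∀ μ : Nat, ∀ t nl : Int, (nl - t).toNat = μ → Odd t → 3 ≤ t →
    0 < nl → Odd nl → (∀ d : Int, 2 ≤ d → d < t → ¬ d ∣ nl) →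
    (bOuter t nl []).1 * ((bOuter t nl []).2).prod = nl ∧
    (∀ f ∈ (bOuter t nl []).2, IsP f ∧ t ≤ f) ∧
    0 < (bOuter t nl []).1 ∧
    (1 < (bOuter t nl []).1 → IsP (bOuter t nl []).1) := by
  intro μ
  induction μ using Nat.strong_induction_on with
  | _ μ ih =>
    intro t nl hμ hot ht hpos honl hinv
    by_cases hc : t * t ≤ nl
    · have hf := bInner_facts t ht nl.natAbs nl rfl hpos
      have hp := bInner_prod t (by omega) nl.natAbs nl rfl hpos
      set r1 := (bInner t nl []).1 with hr1
      set L1 := (bInner t nl []).2 with hL1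
      have hr1pos : 0 < r1 := hf.1
      have hr1dvd : r1 ∣ nl := hf.2.1
      have hnt : ¬ t ∣ r1 := hf.2.2.1
      have hr1le : r1 ≤ nl := Int.le_of_dvd hpos hr1dvd
      have htlt : t < nl := by nlinarith
      have hg : (r1 - (t + 2)).toNat < (nl - t).toNat := by
        by_cases hdvd : t ∣ nl
        · have h3 : 3 * r1 ≤ nl := by nlinarith [hf.2.2.2 hdvd]
          omega
        · have hnil : L1 = [] := by
            by_contra hne
            exact hdvd (hp.2.2 hne)
          have hre : r1 = nl := by
            have hq := hp.1
            rw [hnil] at hq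
            simpa using hq
          omega
      have hstep : bOuter t nl [] = ((bOuter (t + 2) r1 []).1, L1 ++ (bOuter (t + 2) r1 []).2) := by
        rw [bOuter]
        simp only [hc, if_true, ite_true]
        rw [bInner_acc t nl.natAbs nl rfl [], dif_pos (by simpa using hg)]
        simp only [List.nil_append]
        exact bOuter_acc (r1 - (t + 2)).toNat (t + 2) r1 rfl L1
      have hor1 : Odd r1 := odd_of_dvd_odd r1 nl hr1dvd honl
      have hinv' : ∀ d : Int, 2 ≤ d → d < t + 2 → ¬ d ∣ r1 := by
        intro d hd2 hdt hdd
        rcases lt_trichotomy d t with hl | he | hg'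
        · exact hinv d hd2 hl (hdd.trans hr1dvd)
        · exact hnt (he ▸ hdd)
        · have hde : d = t + 1 := by omega
          exact odd_not_dvd_even r1 d hor1
            (hde ▸ Int.even_add_one.mpr (Int.not_even_iff_odd.mpr hot)) hdd
      obtain ⟨e1, e2, e3, e4⟩ := ih (r1 - (t + 2)).toNat (by omega) (t + 2) r1 rfl
        (oddAddTwo t hot) (by omega) hr1pos hor1 hinv'
      rw [hstep]
      refine ⟨?_, ?_, e3, e4⟩
      · simp only [List.prod_append]
        have hLprod : r1 * L1.prod = nl := hp.1
        calc (bOuter (t + 2) r1 []).1 * (L1.prod * ((bOuter (t + 2) r1 []).2).prod)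
            = ((bOuter (t + 2) r1 []).1 * ((bOuter (t + 2) r1 []).2).prod) * L1.prod := by ring
          _ = r1 * L1.prod := by rw [e1]
          _ = nl := hLprod
      · intro f hfm
        rcases List.mem_append.mp hfm with h | h
        · have hft : f = t := hp.2.1 f h
          subst hft
          have htdvd : f ∣ nl := hp.2.2 (by intro hnil; rw [hnil] at h; exact List.not_mem_nil h)
          refine ⟨⟨by omega, ?_⟩, le_refl f⟩
          intro d hd2 hdf hdd
          exact hinv d hd2 (by omega) (hdd.trans htdvd)
        · obtain ⟨hfp, hfle⟩ := e2 f h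
          exact ⟨hfp, by omega⟩
    · have step : bOuter t nl [] = (nl, []) := by
        rw [bOuter]; simp only [hc, if_false, ite_false]
      rw [step]
      refine ⟨by simp, by simp, hpos, ?_⟩
      intro h1
      apply isP_of_no_small nl h1
      intro a ha2 haa had
      have hat : a < t := by nlinarith
      exact hinv a ha2 hat had

lemma aWhile_rel (t : Int) (ht : 3 ≤ t) (ht4 : t ≠ 4) : ∀ m : Nat, ∀ nl : Int, nl.natAbs = m →
    0 < nl → t ∣ nl → ∀ ts cost,
    aWhile t ts nl (PySem.Int.floordiv nl t) cost =
      (if (bInner t nl []).1 = 1 then cost + bCost (bInner t nl []).2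
       else aFor ts (bInner t nl []).1 (cost + bCost (bInner t nl []).2)) := by
  intro m
  induction m using Nat.strong_induction_on with
  | _ m ih =>
    intro nl hm hpos hdvd ts cost
    obtain ⟨k, hk⟩ := hdvd
    have hfd : PySem.Int.floordiv nl t = k := fdiv_pos_eq nl t k (by omega) hk
    have hkpos : 0 < k := by nlinarith
    have hkn : k < nl := by nlinarith
    have habs : k.natAbs < nl.natAbs := by omega
    have hmod : PySem.Int.mod nl t = 0 := (PySem.Int.mod_eq_zero_iff_dvd nl t).mpr ⟨k, hk⟩
    have hbstep : bInner t nl [] = ((bInner t k []).1, [t] ++ (bInner t k []).2) := by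
      rw [bInner, if_pos hmod, hfd, dif_pos habs, List.nil_append]
      exact bInner_acc t k.natAbs k rfl [t]
    by_cases hk1 : k = 1
    · subst hk1
      have e1 : bInner t 1 [] = (1, []) := by
        rw [bInner, if_neg (by rw [mod_one_of t ht]; norm_num)]
      rw [aWhile, hfd, if_pos (show nl - t * 1 = 0 by omega), if_pos rfl]
      rw [hbstep, e1]
      simp [bCost_single_odd t (by omega) ht4]
      ring
    · have estep : aWhile t ts nl (PySem.Int.floordiv nl t) cost =
          aWhile t ts k (PySem.Int.floordiv k t) (cost + 3 + t) := by
        rw [aWhile, hfd, if_pos (show nl - t * k = 0 by omega), if_neg hk1, dif_pos habs]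
      rw [estep, hbstep]
      by_cases htk : t ∣ k
      · rw [ih k.natAbs (by omega) k rfl hkpos htk ts (cost + 3 + t)]
        rw [bCost_append, bCost_single_odd t (by omega) ht4]
        have harith : cost + 3 + t + bCost (bInner t k []).2
            = cost + (3 + t + bCost (bInner t k []).2) := by ring
        rw [harith]
      · have hmk : ¬ PySem.Int.mod k t = 0 := fun h => htk ((PySem.Int.mod_eq_zero_iff_dvd k t).mp h)
        have ek : bInner t k [] = (k, []) := by
          rw [bInner, if_neg hmk]
        have ew : aWhile t ts k (PySem.Int.floordiv k t) (cost + 3 + t) = aFor ts k (cost + 3 + t) := by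
          rw [aWhile, sub_mul_fdiv k t (by omega), if_neg hmk]
        rw [ew, ek]
        simp only [List.append_nil]
        rw [if_neg hk1, bCost_single_odd t (by omega) ht4]
        have harith : cost + 3 + t = cost + (3 + t) := by ring
        rw [harith]

lemma pyRange_two_nil (a b : Int) (h : b ≤ a) : PySem.List.pyRange a b 2 = [] := by
  rw [PySem.List.pyRange_of_pos a b (by norm_num)]
  simp [show ¬ a < b by omega]

lemma pyRange_two_cons (a b : Int) (h : a < b) :
    PySem.List.pyRange a b 2 = a :: PySem.List.pyRange (a + 2) b 2 := by
  rw [PySem.List.pyRange_of_pos a b (by norm_num), PySem.List.pyRange_of_pos (a+2) b (by norm_num)]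
  have hcount : (if a < b then ((b - a + 2 - 1) / 2).toNat else 0)
      = (if a + 2 < b then ((b - (a + 2) + 2 - 1) / 2).toNat else 0) + 1 := by
    split_ifs <;> omega
  rw [hcount, List.range_succ_eq_map]
  simp only [List.map_cons, List.map_map]
  refine List.cons_eq_cons.mpr ⟨by simp, ?_⟩
  apply List.map_congr_left
  intro k _
  simp only [Function.comp_apply]
  push_cast
  ring

lemma main_rel : ∀ μ : Nat, ∀ t nl N : Int, nl.natAbs + (N - t).toNat = μ →
    Odd t → 3 ≤ t → Odd nl → 3 ≤ nl → nl ≤ N → t ≤ N →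
    (∀ d : Int, 2 ≤ d → d < t → ¬ d ∣ nl) → ∀ cost,
    aFor (PySem.List.pyRange t (N + 1) 2) nl cost =
      cost + bCost (bOuter t nl []).2 +
        (if 1 < (bOuter t nl []).1 then 3 + (bOuter t nl []).1 else 0) := by
  intro μ
  induction μ using Nat.strong_induction_on with
  | _ μ ih =>
    intro t nl N hμ hot ht3 honl hnl3 hnlN htN hinv cost
    have ht4 : t ≠ 4 := by rintro rfl; exact (by decide : ¬ Odd (4:Int)) hot
    rw [pyRange_two_cons t (N + 1) (by omega), aFor]
    by_cases hlt : PySem.Int.floordiv nl t < t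
    · have hsm : nl < t * t := (PySem.Int.floordiv_lt_iff_lt_mul (by omega)).mp hlt
      have hob : bOuter t nl [] = (nl, []) := by
        rw [bOuter, if_neg (by omega : ¬ t * t ≤ nl)]
      rw [if_pos hlt, hob]
      rw [if_pos (by omega : (1:Int) < nl)]
      simp [bCost]
      ring
    · have hge : t * t ≤ nl := (PySem.Int.le_floordiv_iff_mul_le (by omega)).mp (by omega)
      have hnlt : t < nl := by nlinarith
      rw [if_neg hlt]
      by_cases hdvd : t ∣ nl
      · have hf := bInner_facts t ht3 nl.natAbs nl rfl (by omega)
        set r1 := (bInner t nl []).1 with hr1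
        set r2 := (bInner t nl []).2 with hr2
        have hr1pos : 0 < r1 := hf.1
        have hr1dvd : r1 ∣ nl := hf.2.1
        have hnt : ¬ t ∣ r1 := hf.2.2.1
        have hle : t * r1 ≤ nl := hf.2.2.2 hdvd
        have hr1lt : r1 < nl := by nlinarith
        have hor1 : Odd r1 := by
          rcases Int.even_or_odd r1 with he | ho
          · exact absurd hr1dvd (odd_not_dvd_even nl r1 honl he)
          · exact ho
        have hguard : (r1 - (t + 2)).toNat < (nl - t).toNat := by omega
        have hob : bOuter t nl [] = bOuter (t + 2) r1 r2 := by
          rw [bOuter, if_pos hge, dif_pos hguard]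
        rw [aWhile_rel t ht3 ht4 nl.natAbs nl rfl (by omega) hdvd]
        by_cases h1 : r1 = 1
        · rw [if_pos h1]
          have he2 : bOuter (t + 2) r1 r2 = (r1, r2) := by
            rw [bOuter, if_neg (by nlinarith : ¬ (t + 2) * (t + 2) ≤ r1)]
          rw [hob, he2, if_neg (by omega)]
          ring
        · have hr13 : 3 ≤ r1 := by obtain ⟨w, hw⟩ := hor1; omega
          have hne1 : r1 ≠ t + 1 := by
            intro he
            exact odd_not_dvd_even r1 (t + 1) hor1 (Int.even_add_one.mpr (Int.not_even_iff_odd.mpr hot)) (he ▸ dvd_refl r1)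
          have hge2 : t + 2 ≤ r1 := by
            by_contra hcon
            push_neg at hcon
            have hler : r1 ≤ t := by omega
            rcases eq_or_lt_of_le hler with he | hl
            · exact hnt (he ▸ dvd_refl r1)
            · exact hinv r1 (by omega) hl hr1dvd
          have hinv' : ∀ d : Int, 2 ≤ d → d < t + 2 → ¬ d ∣ r1 := by
            intro d hd2 hdt hddvd
            rcases lt_trichotomy d t with hl | he | hg
            · exact hinv d hd2 hl (hddvd.trans hr1dvd)
            · exact hnt (he ▸ hddvd)
            · have hde : d = t + 1 := by omega
              exact odd_not_dvd_even r1 d hor1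
                (hde ▸ Int.even_add_one.mpr (Int.not_even_iff_odd.mpr hot)) hddvd
          rw [if_neg h1]
          rw [ih (r1.natAbs + (N - (t + 2)).toNat) (by omega) (t + 2) r1 N rfl
              (oddAddTwo t hot) (by omega) hor1 hr13 (by omega) (by omega) hinv' (cost + bCost r2)]
          rw [hob, bOuter_acc ((r1 - (t + 2)).toNat) (t + 2) r1 rfl r2, bCost_append]
          by_cases hbig : 1 < (bOuter (t + 2) r1 []).1
          · rw [if_pos hbig]; ring
          · rw [if_neg hbig]; ring
      · have hmod : ¬ PySem.Int.mod nl t = 0 :=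
          fun h => hdvd ((PySem.Int.mod_eq_zero_iff_dvd nl t).mp h)
        have ew : aWhile t (PySem.List.pyRange (t + 2) (N + 1) 2) nl (PySem.Int.floordiv nl t) cost
            = aFor (PySem.List.pyRange (t + 2) (N + 1) 2) nl cost := by
          rw [aWhile, sub_mul_fdiv nl t (by omega), if_neg hmod]
        have hge2 : t + 2 ≤ nl := by nlinarith
        have hek : bInner t nl [] = (nl, []) := by
          rw [bInner, if_neg hmod]
        have hob : bOuter t nl [] = bOuter (t + 2) nl [] := by
          rw [bOuter, if_pos hge, hek, dif_pos (by simp; omega)]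
        have hinv' : ∀ d : Int, 2 ≤ d → d < t + 2 → ¬ d ∣ nl := by
          intro d hd2 hdt hddvd
          rcases lt_trichotomy d t with hl | he | hg
          · exact hinv d hd2 hl hddvd
          · exact hdvd (he ▸ hddvd)
          · have hde : d = t + 1 := by omega
            exact odd_not_dvd_even nl d honl
              (hde ▸ Int.even_add_one.mpr (Int.not_even_iff_odd.mpr hot)) hddvd
        rw [ew, hob, ih (nl.natAbs + (N - (t + 2)).toNat) (by omega) (t + 2) nl N rfl
            (oddAddTwo t hot) (by omega) honl hnl3 hnlN (by omega) hinv' cost]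

-- ---------- B-side: integer square root ----------

lemma bIsqrt_spec : ∀ μ : Nat, ∀ r nl : Int, (nl - r).toNat = μ → 1 ≤ r → r * r ≤ nl →
    1 ≤ bIsqrt r nl ∧ bIsqrt r nl * bIsqrt r nl ≤ nl ∧
    nl < (bIsqrt r nl + 1) * (bIsqrt r nl + 1) := by
  intro μ
  induction μ using Nat.strong_induction_on with
  | _ μ ih =>
    intro r nl hμ hr hrr
    by_cases hc : (r + 1) * (r + 1) ≤ nl
    · have hrlt : r < nl := by nlinarith
      have estep : bIsqrt r nl = bIsqrt (r + 1) nl := by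
        rw [bIsqrt, dif_pos hc]
      rw [estep]
      exact ih (nl - (r + 1)).toNat (by omega) (r + 1) nl rfl (by omega) hc
    · have estep : bIsqrt r nl = r := by
        rw [bIsqrt, dif_neg hc]
      rw [estep]
      exact ⟨hr, hrr, by omega⟩

-- ---------- B-side: the sieve of Eratosthenes ----------

lemma pyGetD_getD (s : List Bool) (p : Int) (h0 : 0 ≤ p) (h1 : p < (s.length : Int)) :
    PySem.List.pyGetD s p false = s.getD p.toNat false := by
  rw [PySem.List.pyGetD_eq_getElem s false h0 h1,
      List.getD_eq_getElem s false (by omega : p.toNat < s.length)]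

lemma getD_set_false (s : List Bool) (i k : Nat) :
    (s.set i false).getD k false = if k = i ∧ k < s.length then false else s.getD k false := by
  rw [List.getD_eq_getElem?_getD, List.getElem?_set, List.getD_eq_getElem?_getD]
  by_cases h1 : k = i
  · subst h1
    by_cases h2 : k < s.length <;> simp [h2]
  · have h1' : ¬ i = k := fun hc => h1 hc.symm
    rw [if_neg h1', if_neg (fun hc : k = i ∧ k < s.length => h1 hc.1)]

lemma bMark_length (qs : List Int) : ∀ s : List Bool, (bMark s qs).length = s.length := by
  induction qs with
  | nil => intro s; rfl
  | cons q rest ih =>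
    intro s
    show (bMark (PySem.List.pySetD s q false) rest).length = s.length
    rw [ih, PySem.List.length_pySetD]

lemma bMark_mono (qs : List Int) (hq : ∀ q ∈ qs, 0 ≤ q) : ∀ s : List Bool, ∀ k : Nat,
    s.getD k false = false → (bMark s qs).getD k false = false := by
  induction qs with
  | nil => intro s k h; exact h
  | cons q rest ih =>
    intro s k h
    show (bMark (PySem.List.pySetD s q false) rest).getD k false = false
    apply ih (fun x hx => hq x (by simp [hx]))
    rw [PySem.List.pySetD_of_nonneg s false (hq q (by simp)), getD_set_false]
    split_ifs with hc
    · rfl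
    · exact h

lemma bMark_marks (qs : List Int) (hq : ∀ q ∈ qs, 0 ≤ q) : ∀ s : List Bool, ∀ q ∈ qs,
    q.toNat < s.length → (bMark s qs).getD q.toNat false = false := by
  induction qs with
  | nil => intro s q h; exact absurd h (List.not_mem_nil)
  | cons x rest ih =>
    intro s q hmem hlen
    have hx0 : 0 ≤ x := hq x (by simp)
    rcases List.mem_cons.mp hmem with h | h
    · subst h
      show (bMark (PySem.List.pySetD s q false) rest).getD q.toNat false = false
      apply bMark_mono rest (fun x hx => hq x (by simp [hx]))
      rw [PySem.List.pySetD_of_nonneg s false hx0, getD_set_false]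
      rw [if_pos ⟨rfl, hlen⟩]
    · show (bMark (PySem.List.pySetD s x false) rest).getD q.toNat false = false
      apply ih (fun y hy => hq y (by simp [hy]))
      · exact h
      · rw [PySem.List.length_pySetD]; exact hlen

lemma bMark_sound (qs : List Int) (hq : ∀ q ∈ qs, 0 ≤ q) : ∀ s : List Bool, ∀ k : Nat,
    (bMark s qs).getD k false = false →
    s.getD k false = false ∨ ∃ q ∈ qs, q.toNat = k := by
  induction qs with
  | nil => intro s k h; exact Or.inl h
  | cons x rest ih =>
    intro s k h
    have hx0 : 0 ≤ x := hq x (by simp)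
    have := ih (fun y hy => hq y (by simp [hy])) (PySem.List.pySetD s x false) k h
    rcases this with h1 | ⟨q, hq1, hq2⟩
    · rw [PySem.List.pySetD_of_nonneg s false hx0, getD_set_false] at h1
      by_cases hc : k = x.toNat ∧ k < s.length
      · exact Or.inr ⟨x, by simp, hc.1.symm⟩
      · rw [if_neg hc] at h1
        exact Or.inl h1
    · exact Or.inr ⟨q, by simp [hq1], hq2⟩

lemma sieve_inv (r : Int) : ∀ μ : Nat, ∀ p : Int, ∀ s : List Bool, (r + 1 - p).toNat = μ →
    2 ≤ p → s.length = (r + 1).toNat →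
    (∀ k : Nat, k < s.length → s.getD k false = false → ∃ d : Nat, 2 ≤ d ∧ d * d ≤ k ∧ d ∣ k) →
    (∀ q : Nat, q.Prime → (q : Int) < p → ∀ k : Nat, k < s.length → q ∣ k → q * q ≤ k →
      s.getD k false = false) →
    (bSieveOuter p r s).length = (r + 1).toNat ∧
    (∀ k : Nat, k < (r + 1).toNat → (bSieveOuter p r s).getD k false = false →
      ∃ d : Nat, 2 ≤ d ∧ d * d ≤ k ∧ d ∣ k) ∧
    (∀ q : Nat, q.Prime → (q : Int) ≤ r → ∀ k : Nat, k < (r + 1).toNat → q ∣ k → q * q ≤ k →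
      (bSieveOuter p r s).getD k false = false) := by
  intro μ
  induction μ using Nat.strong_induction_on with
  | _ μ ih =>
    intro p s hμ hp hlen hI2 hI3
    by_cases hpr : p ≤ r
    · have hqnn : ∀ q ∈ PySem.List.pyRange (p * p) (r + 1) p, 0 ≤ q := by
        intro q hmem
        have := (PySem.List.mem_pyRange_iff_of_pos (by omega : (0:Int) < p) q).mp hmem
        nlinarith [this.1]
      set s₁ := (if PySem.List.pyGetD s p false = true then
          bMark s (PySem.List.pyRange (p * p) (r + 1) p) else s) with hs₁
      have hlen₁ : s₁.length = (r + 1).toNat := by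
        rw [hs₁]; split_ifs
        · rw [bMark_length]; exact hlen
        · exact hlen
      have hmono : ∀ k : Nat, k < s.length → s.getD k false = false → s₁.getD k false = false := by
        intro k _ hk
        rw [hs₁]; split_ifs
        · exact bMark_mono _ hqnn s k hk
        · exact hk
      have hI2₁ : ∀ k : Nat, k < s₁.length → s₁.getD k false = false →
          ∃ d : Nat, 2 ≤ d ∧ d * d ≤ k ∧ d ∣ k := by
        intro k hk hkf
        rw [hs₁] at hkf
        split_ifs at hkf with hbr
        · rcases bMark_sound _ hqnn s k hkf with h | ⟨q, hq1, hq2⟩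
          · exact hI2 k (by omega) h
          · have hmem := (PySem.List.mem_pyRange_iff_of_pos (by omega : (0:Int) < p) q).mp hq1
            have hq0 : 0 ≤ q := hqnn q hq1
            have hkq : (k : Int) = q := by omega
            have hpdq : p ∣ q := by
              have h1 : p ∣ q - p * p := hmem.2.2
              have h2 : p ∣ p * p := ⟨p, rfl⟩
              have := dvd_add h1 h2
              simpa using this
            have hpp : (p.toNat : Int) = p := by omega
            refine ⟨p.toNat, by omega, ?_, ?_⟩
            · have hle : (p.toNat : Int) * (p.toNat : Int) ≤ (k : Int) := by
                rw [hpp, hkq]; exact hmem.1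
              exact_mod_cast hle
            · have hdv : (p.toNat : Int) ∣ (k : Int) := by rw [hpp, hkq]; exact hpdq
              exact_mod_cast hdv
        · exact hI2 k (by omega) hkf
      have claimC : p.toNat.Prime → ∀ k : Nat, k < (r + 1).toNat → p.toNat ∣ k →
          p.toNat * p.toNat ≤ k → s₁.getD k false = false := by
        intro hpprime k hk hdvd hsq
        have hpn : (p.toNat : Int) = p := by omega
        have hptrue : s.getD p.toNat false = true := by
          rcases hb : s.getD p.toNat false with _ | _
          · exfalso
            obtain ⟨d, hd2, hdd, hddvd⟩ := hI2 p.toNat (by omega) hb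
            have hdlt : d < p.toNat := by
              have h2le : 2 ≤ p.toNat := hpprime.two_le
              nlinarith
            rcases hpprime.eq_one_or_self_of_dvd d hddvd with h | h <;> omega
          · rfl
        have hbr : PySem.List.pyGetD s p false = true := by
          rw [pyGetD_getD s p (by omega) (by omega : p < (s.length : Int))]
          exact hptrue
        rw [hs₁, if_pos hbr]
        apply bMark_marks _ hqnn s (k : Int) _ (by omega)
        · rw [PySem.List.mem_pyRange_iff_of_pos (by omega : (0:Int) < p)]
          refine ⟨?_, by omega, ?_⟩
          · have hcast : (p.toNat : Int) * (p.toNat : Int) ≤ (k : Int) := by exact_mod_cast hsq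
            rw [hpn] at hcast
            exact hcast
          · have h1 : (p.toNat : Int) ∣ (k : Int) := Int.natCast_dvd_natCast.mpr hdvd
            rw [hpn] at h1
            exact dvd_sub h1 ⟨p, rfl⟩
      have hI3₁ : ∀ q : Nat, q.Prime → (q : Int) < p + 1 → ∀ k : Nat, k < s₁.length →
          q ∣ k → q * q ≤ k → s₁.getD k false = false := by
        intro q hq hqp k hkl hdvd hsq
        by_cases hqlt : (q : Int) < p
        · exact hmono k (by omega) (hI3 q hq hqlt k (by omega) hdvd hsq)
        · have hqe : q = p.toNat := by omega
          subst hqe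
          exact claimC hq k (by omega) hdvd hsq
      have estep : bSieveOuter p r s = bSieveOuter (p + 1) r s₁ := by
        rw [bSieveOuter, dif_pos hpr]
      rw [estep]
      exact ih (r + 1 - (p + 1)).toNat (by omega) (p + 1) s₁ rfl (by omega) hlen₁ hI2₁ hI3₁
    · have estep : bSieveOuter p r s = s := by
        rw [bSieveOuter, dif_neg hpr]
      rw [estep]
      refine ⟨hlen, fun k hk => hI2 k (by omega), ?_⟩
      intro q hq hqr k hk hdvd hsq
      exact hI3 q hq (by omega) k (by omega) hdvd hsq

-- ---------- B-side: the division loop over the sieve ----------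

lemma bDivOne_spec (p : Int) (hp : 2 ≤ p) : ∀ m : Nat, ∀ nl : Int, nl.natAbs = m → 0 < nl →
    ∀ cost, ∃ j : Nat,
    (bDivOne p nl cost).1 * p ^ j = nl ∧
    (bDivOne p nl cost).2 = cost + (j : Int) * (3 + p) ∧
    ¬ p ∣ (bDivOne p nl cost).1 ∧ 0 < (bDivOne p nl cost).1 := by
  intro m
  induction m using Nat.strong_induction_on with
  | _ m ih =>
    intro nl hm hpos cost
    by_cases hdvd : PySem.Int.mod nl p = 0
    · obtain ⟨k, hk⟩ := (PySem.Int.mod_eq_zero_iff_dvd nl p).mp hdvd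
      have hfd : PySem.Int.floordiv nl p = k := fdiv_pos_eq nl p k (by omega) hk
      have hkpos : 0 < k := by nlinarith
      have hklt : k < nl := by nlinarith
      have habs : k.natAbs < nl.natAbs := by omega
      have estep : bDivOne p nl cost = bDivOne p k (cost + (3 + p)) := by
        rw [bDivOne, hfd]
        simp only [hdvd, if_true, dif_pos habs, ite_true]
      obtain ⟨j, e1, e2, e3, e4⟩ := ih k.natAbs (by omega) k rfl hkpos (cost + (3 + p))
      rw [estep] at *
      refine ⟨j + 1, ?_, ?_, e3, e4⟩
      · rw [pow_succ]
        calc (bDivOne p k (cost + (3 + p))).1 * (p ^ j * p)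
            = (bDivOne p k (cost + (3 + p))).1 * p ^ j * p := by ring
          _ = k * p := by rw [e1]
          _ = nl := by rw [hk]; ring
      · rw [e2]; push_cast; ring
    · have estep : bDivOne p nl cost = (nl, cost) := by
        rw [bDivOne]; simp only [hdvd, if_false, ite_false]
      rw [estep]
      exact ⟨0, by simp, by simp, fun h => hdvd ((PySem.Int.mod_eq_zero_iff_dvd nl p).mpr h), hpos⟩

lemma priceOdd_replicate (j : Nat) (p : Int) : priceOdd (List.replicate j p) = (j : Int) * (3 + p) := by
  simp [priceOdd, List.map_replicate, List.sum_replicate, nsmul_eq_mul]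

lemma divloop_spec (r : Int) (s : List Bool) (hs : s.length = (r + 1).toNat)
    (S1 : ∀ p : Int, 3 ≤ p → p ≤ r → PySem.List.pyGetD s p false = true → p.toNat.Prime)
    (S2 : ∀ q : Nat, q.Prime → 3 ≤ (q : Int) → (q : Int) ≤ r →
      PySem.List.pyGetD s (q : Int) false = true) :
    ∀ μ : Nat, ∀ p nl cost : Int, (r + 1 - p).toNat = μ → 3 ≤ p → 0 < nl →
    ∃ F : List Int,
      (bDivLoop (PySem.List.pyRange p (r + 1) 1) s nl cost).1 * F.prod = nl ∧
      (bDivLoop (PySem.List.pyRange p (r + 1) 1) s nl cost).2 = cost + priceOdd F ∧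
      (∀ f ∈ F, f.toNat.Prime ∧ 3 ≤ f) ∧
      0 < (bDivLoop (PySem.List.pyRange p (r + 1) 1) s nl cost).1 ∧
      (∀ q : Nat, q.Prime → p ≤ (q : Int) → (q : Int) ≤ r →
        ¬ (q : Int) ∣ (bDivLoop (PySem.List.pyRange p (r + 1) 1) s nl cost).1) := by
  intro μ
  induction μ using Nat.strong_induction_on with
  | _ μ ih =>
    intro p nl cost hμ hp hpos
    by_cases hpr : p < r + 1
    · rw [PySem.List.pyRange_one_cons hpr]
      by_cases hbr : PySem.List.pyGetD s p false = true
      · have hpprime : p.toNat.Prime := S1 p hp (by omega) hbr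
        have estep : bDivLoop (p :: PySem.List.pyRange (p + 1) (r + 1) 1) s nl cost
            = bDivLoop (PySem.List.pyRange (p + 1) (r + 1) 1) s (bDivOne p nl cost).1 (bDivOne p nl cost).2 := by
          rw [bDivLoop, if_pos hbr]
        obtain ⟨j, e1, e2, e3, e4⟩ := bDivOne_spec p (by omega) nl.natAbs nl rfl hpos cost
        obtain ⟨F', f1, f2, f3, f4, f5⟩ := ih (r + 1 - (p + 1)).toNat (by omega) (p + 1)
          (bDivOne p nl cost).1 (bDivOne p nl cost).2 rfl (by omega) e4
        rw [estep]
        refine ⟨List.replicate j p ++ F', ?_, ?_, ?_, f4, ?_⟩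
        · rw [List.prod_append, List.prod_replicate]
          calc _ * (p ^ j * F'.prod)
              = (_ * F'.prod) * p ^ j := by ring
            _ = (bDivOne p nl cost).1 * p ^ j := by rw [f1]
            _ = nl := e1
        · rw [f2, e2, priceOdd_append, priceOdd_replicate]
          ring
        · intro f hf
          rcases List.mem_append.mp hf with h | h
          · have : f = p := List.eq_of_mem_replicate h
            subst this
            exact ⟨hpprime, hp⟩
          · exact f3 f h
        · intro q hq hq1 hq2
          by_cases hqe : (q : Int) = p
          · intro hdvdq
            apply e3
            have hfin : (bDivLoop (PySem.List.pyRange (p + 1) (r + 1) 1) s (bDivOne p nl cost).1 (bDivOne p nl cost).2).1 ∣ (bDivOne p nl cost).1 :=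
              ⟨F'.prod, f1.symm⟩
            have h' := hdvdq.trans hfin
            rwa [hqe] at h'
          · exact f5 q hq (by omega) hq2
      · have hnp : ¬ p.toNat.Prime := by
          intro hc
          have hpn : ((p.toNat : Int)) = p := by omega
          have := S2 p.toNat hc (by omega) (by omega)
          rw [hpn] at this
          exact hbr this
        have estep : bDivLoop (p :: PySem.List.pyRange (p + 1) (r + 1) 1) s nl cost
            = bDivLoop (PySem.List.pyRange (p + 1) (r + 1) 1) s nl cost := by
          rw [bDivLoop, if_neg hbr]
        rw [estep]
        obtain ⟨F', f1, f2, f3, f4, f5⟩ := ih (r + 1 - (p + 1)).toNat (by omega) (p + 1) nl cost rfl (by omega) hpos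
        refine ⟨F', f1, f2, f3, f4, ?_⟩
        intro q hq hq1 hq2
        by_cases hqe : (q : Int) = p
        · exfalso
          apply hnp
          have : q = p.toNat := by omega
          rwa [← this]
        · exact f5 q hq (by omega) hq2
    · rw [PySem.List.pyRange_one_eq_nil (by omega)]
      refine ⟨[], by simp [bDivLoop], by simp [bDivLoop, priceOdd], by simp, by simp [bDivLoop]; omega, ?_⟩
      intro q _ hq1 hq2
      intro _
      omega

-- ---------- final assembly ----------

lemma replicate_true_getD (n k : Nat) (hk : k < n) :
    (List.replicate n true).getD k false = true := by
  rw [List.getD_eq_getElem _ _ (by simpa using hk)]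
  simp

set_option maxHeartbeats 1000000 in
lemma fft_final (n : Int) (hpre : n ≠ 0) : fft_cost n = fft_cost_alt n := by
  obtain ⟨hodd, hv, hrec⟩ := phase_rel n.natAbs n rfl hpre
  set m := (bV2 n 0).1 with hm
  set c0 := 5 * PySem.Int.floordiv ((bV2 n 0).2 + 1) 2 with hc0
  have hrec0 := hrec 0
  rw [zero_add] at hrec0
  simp only [fft_cost, fft_cost_alt, hrec0, ← hm, ← hc0]
  by_cases h1 : m = 1
  · rw [if_pos h1, if_neg (by omega : ¬ (3:Int) ≤ m)]
  · rw [if_neg h1]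
    by_cases h3 : 3 ≤ m
    · rw [if_pos h3]
      -- A side: odd trial division
      have hinv : ∀ d : Int, 2 ≤ d → d < 3 → ¬ d ∣ m := by
        intro d hd2 hd3 hdd
        have : d = 2 := by omega
        exact odd_not_dvd_even m d hodd (this ▸ (by decide : Even (2:Int))) hdd
      have hA := main_rel (m.natAbs + (m - 3).toNat) 3 m m rfl (by decide) (by norm_num)
        hodd h3 le_rfl h3 hinv c0
      have hB := bOuter_main (m - 3).toNat 3 m rfl (by decide) (by norm_num) (by omega) hodd hinv
      set rA := (bOuter 3 m []).1 with hrA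
      set LA := (bOuter 3 m []).2 with hLA
      obtain ⟨hAprod, hAfacts, hApos, hAprime⟩ := hB
      have hLAok : ∀ f ∈ LA, f ≠ 2 ∧ f ≠ 4 := by
        intro f hf
        obtain ⟨hP, h3f⟩ := hAfacts f hf
        exact ⟨by omega, isP_ne_four f hP⟩
      -- B side: sieve + division by primes
      have hsq := bIsqrt_spec (m - 1).toNat 1 m rfl (le_refl 1) (by omega)
      set r0 := bIsqrt 1 m with hr0
      obtain ⟨hr1, hrle, hrgt⟩ := hsq
      have hs0len : (PySem.List.pyRepeat [true] (r0 + 1)).length = (r0 + 1).toNat := by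
        rw [PySem.List.pyRepeat_singleton]
        simp
      have hsieve := sieve_inv r0 (r0 - 1).toNat 2 (PySem.List.pyRepeat [true] (r0 + 1))
        (by omega) (by norm_num) hs0len
        (by
          intro k hk hkf
          rw [PySem.List.pyRepeat_singleton] at hkf
          rw [replicate_true_getD (r0 + 1).toNat k (by rw [hs0len] at hk; simpa using hk)] at hkf
          exact absurd hkf (by simp)
        )
        (by
          intro q hq hq2
          have := hq.two_le
          omega
        )
      set sv := bSieveOuter 2 r0 (PySem.List.pyRepeat [true] (r0 + 1)) with hsv
      obtain ⟨hsvlen, hI2f, hI3f⟩ := hsieve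
      have hS1 : ∀ p : Int, 3 ≤ p → p ≤ r0 → PySem.List.pyGetD sv p false = true → p.toNat.Prime := by
        intro p hp3 hpr hget
        by_contra hnp
        have hnIsP : ¬ IsP p := fun hc => hnp (isP_prime p hc)
        obtain ⟨q, hqprime, hqdvd, hqsq⟩ := prime_divisor_small p (by omega) hnIsP
        have hq2 : 2 ≤ (q : Int) := by exact_mod_cast hqprime.two_le
        have hqr : (q : Int) ≤ r0 := by nlinarith
        have hfalse := hI3f q hqprime hqr p.toNat (by omega)
          (by
            have : (q : Int) ∣ ((p.toNat : Int)) := by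
              rwa [Int.toNat_of_nonneg (by omega : (0:Int) ≤ p)]
            exact_mod_cast this)
          (by
            have : (q : Int) * (q : Int) ≤ ((p.toNat : Int)) := by
              rwa [Int.toNat_of_nonneg (by omega : (0:Int) ≤ p)]
            exact_mod_cast this)
        rw [pyGetD_getD sv p (by omega) (by omega : p < (sv.length : Int))] at hget
        rw [hget] at hfalse
        exact absurd hfalse (by simp)
      have hS2 : ∀ q : Nat, q.Prime → 3 ≤ (q : Int) → (q : Int) ≤ r0 →
          PySem.List.pyGetD sv (q : Int) false = true := by
        intro q hq hq3 hqr
        rw [pyGetD_getD sv (q : Int) (by omega) (by omega : (q:Int) < (sv.length : Int))]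
        have hqt : ((q : Int)).toNat = q := by omega
        rw [hqt]
        rcases hb : sv.getD q false with _ | _
        · exfalso
          obtain ⟨d, hd2, hdd, hddvd⟩ := hI2f q (by omega) hb
          rcases hq.eq_one_or_self_of_dvd d hddvd with h | h <;> nlinarith [hq.two_le]
        · rfl
      obtain ⟨F, f1, f2, f3, f4, f5⟩ := divloop_spec r0 sv hsvlen hS1 hS2
        (r0 + 1 - 3).toNat 3 m c0 rfl (by norm_num) (by omega)
      set nl' := (bDivLoop (PySem.List.pyRange 3 (r0 + 1) 1) sv m c0).1 with hnl'
      set cost' := (bDivLoop (PySem.List.pyRange 3 (r0 + 1) 1) sv m c0).2 with hcost'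
      have hnl'dvd : nl' ∣ m := ⟨F.prod, f1.symm⟩
      have hnl'odd : Odd nl' := odd_of_dvd_odd nl' m hnl'dvd hodd
      have hnl'le : nl' ≤ m := Int.le_of_dvd (by omega) hnl'dvd
      have hleftprime : 1 < nl' → IsP nl' := by
        intro hgt
        by_contra hnIsP
        obtain ⟨q, hqprime, hqdvd, hqsq⟩ := prime_divisor_small nl' hgt hnIsP
        have hq2 : 2 ≤ (q : Int) := by exact_mod_cast hqprime.two_le
        by_cases hq2e : (q : Int) = 2
        · exact odd_not_dvd_even nl' (q : Int) hnl'odd (by rw [hq2e]; decide) hqdvd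
        · have hq3 : 3 ≤ (q : Int) := by omega
          have hqr : (q : Int) ≤ r0 := by nlinarith
          exact f5 q hqprime hq3 hqr hqdvd
      -- assemble both sides as priced factor lists
      have hAside : aFor (PySem.List.pyRange 3 (m + 1) 2) m c0 =
          c0 + priceOdd (LA ++ if 1 < rA then [rA] else []) := by
        rw [hA, bCost_eq_priceOdd LA hLAok, priceOdd_append]
        by_cases hbig : 1 < rA
        · rw [if_pos hbig, if_pos hbig]
          simp [priceOdd]
          ring
        · rw [if_neg hbig, if_neg hbig]
          simp [priceOdd]
      have hBside : (if 1 < nl' then cost' + (3 + nl') else cost') =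
          c0 + priceOdd (F ++ if 1 < nl' then [nl'] else []) := by
        rw [priceOdd_append, f2]
        by_cases hbig : 1 < nl'
        · rw [if_pos hbig, if_pos hbig]
          simp [priceOdd]
          ring
        · rw [if_neg hbig, if_neg hbig]
          simp [priceOdd]
      have hprice : priceOdd (LA ++ if 1 < rA then [rA] else []) =
          priceOdd (F ++ if 1 < nl' then [nl'] else []) := by
        apply priceOdd_eq_of_prime_prod _ _ m (by omega)
        · intro f hf
          rcases List.mem_append.mp hf with h | h
          · exact isP_prime f (hAfacts f h).1
          · by_cases hbig : 1 < rA
            · rw [if_pos hbig] at h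
              have hfr : f = rA := by simpa using h
              rw [hfr]
              exact isP_prime rA (hAprime hbig)
            · rw [if_neg hbig] at h
              exact absurd h (List.not_mem_nil)
        · intro f hf
          rcases List.mem_append.mp hf with h | h
          · exact (f3 f h).1
          · by_cases hbig : 1 < nl'
            · rw [if_pos hbig] at h
              have hfr : f = nl' := by simpa using h
              rw [hfr]
              exact isP_prime nl' (hleftprime hbig)
            · rw [if_neg hbig] at h
              exact absurd h (List.not_mem_nil)
        · rw [List.prod_append]
          by_cases hbig : 1 < rA
          · rw [if_pos hbig]
            simp only [List.prod_cons, List.prod_nil]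
            calc LA.prod * (rA * 1) = rA * LA.prod := by ring
              _ = m := hAprod
          · rw [if_neg hbig]
            have : rA = 1 := by omega
            simp only [List.prod_nil, mul_one]
            rw [this] at hAprod
            linarith [hAprod]
        · rw [List.prod_append]
          by_cases hbig : 1 < nl'
          · rw [if_pos hbig]
            simp only [List.prod_cons, List.prod_nil]
            calc F.prod * (nl' * 1) = nl' * F.prod := by ring
              _ = m := f1
          · rw [if_neg hbig]
            have : nl' = 1 := by omega
            simp only [List.prod_nil, mul_one]
            rw [this] at f1
            linarith [f1]
      rw [hAside, hBside, hprice]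
    · rw [if_neg h3]
      have hneg : m + 1 ≤ 3 := by
        rcases hodd with ⟨w, hw⟩
        omega
      rw [pyRange_two_nil 3 (m + 1) hneg, aFor]

-- ===== VERDICT (by name: the statement is the Claim_ definition above) =====
theorem fft_cost_spec : Claim_equal_fft_cost := by
  intro n _hdom hpre
  unfold Spec_fft_cost
  exact fft_final n hpre
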